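-- pv_equiv track=rewrite | github.com/Veltys/RPPGCT | Python/sonda_dht11.py | procesar_argumentos
-- ===== SOURCE A (Python) =====
-- def procesar_argumentos(argumentos):
--     ''' Procesado de los argumentos
--     '''
--
--     res = []
--
--     if len(argumentos) == 1:
--         for _ in range(4):
--             res.append(True)
--
--     else:
--         if any('-i' in s for s in argumentos):
--             res.append(True)
--
--         else:
--             res.append(False)
--
--         if any('-t' in s for s in argumentos):
--             res.append(True)
--
--         else:
--             res.append(False)
--
--         if any('-m' in s for s in argumentos):
--             res.append(True)
--
--         else:
--             res.append(False)
--
--         if any('-u' in s for s in argumentos):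
--             res.append(True)
--
--         else:
--             res.append(False)
--
--     return res
-- ===== SOURCE B (Python) =====
-- def procesar_argumentos(argumentos):
--     ''' Procesado de los argumentos
--     '''
--
--     if len(argumentos) == 1:
--         return [True] * 4
--
--     flags = ['-i', '-t', '-m', '-u']
--     seen = set()
--     for s in argumentos:
--         for f in flags:
--             if f in s:
--                 seen.add(f)
--     return [f in seen for f in flags]
-- ===== Notes on version B (the rewrite author's own statement) =====
-- stated objective: alternative
-- what changed: Replaces the four separate any() scans over the argument list with a single pass that records every flag substring found in a set, followed by a lookup pass over the flag list.
import Mathlib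
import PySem

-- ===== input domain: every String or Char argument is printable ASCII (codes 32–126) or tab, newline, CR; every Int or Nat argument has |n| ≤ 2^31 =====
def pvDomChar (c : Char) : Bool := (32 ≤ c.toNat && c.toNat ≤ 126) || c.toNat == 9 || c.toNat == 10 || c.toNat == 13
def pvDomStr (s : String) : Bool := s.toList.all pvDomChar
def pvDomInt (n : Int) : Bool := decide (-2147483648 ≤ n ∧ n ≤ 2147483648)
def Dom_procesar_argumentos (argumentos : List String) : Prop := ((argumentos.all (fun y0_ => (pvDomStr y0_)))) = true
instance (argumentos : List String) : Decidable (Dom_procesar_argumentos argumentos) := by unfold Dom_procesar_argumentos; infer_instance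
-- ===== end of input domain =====

-- B makes a single pass over the arguments recording found flags in a set, then one lookup pass; A runs four separate any() scans. Equivalence of return values proved for all inputs.

-- ===== PORT A =====
def procesar_argumentos (argumentos : List String) : List Bool :=
  let res : List Bool := []
  if argumentos.length == 1 then
    (PySem.List.pyRange 0 4 1).foldl (fun res _ => res ++ [true]) res
  else
    let res := if argumentos.any (fun s => PySem.Str.isIn "-i" s) then res ++ [true] else res ++ [false]
    let res := if argumentos.any (fun s => PySem.Str.isIn "-t" s) then res ++ [true] else res ++ [false]
    let res := if argumentos.any (fun s => PySem.Str.isIn "-m" s) then res ++ [true] else res ++ [false]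
    let res := if argumentos.any (fun s => PySem.Str.isIn "-u" s) then res ++ [true] else res ++ [false]
    res

-- ===== PORT B =====
def pvFlags : List String := ["-i", "-t", "-m", "-u"]

def procesar_argumentos_alt (argumentos : List String) : List Bool :=
  if argumentos.length == 1 then
    [true, true, true, true]
  else
    let seen : PySem.Set String := argumentos.foldl
      (fun seen s => pvFlags.foldl
        (fun seen f => if PySem.Str.isIn f s then PySem.Set.add seen f else seen) seen)
      PySem.Set.empty
    pvFlags.map (fun f => PySem.Set.contains seen f)

-- ===== PRECONDITION & SPEC =====
def Spec_procesar_argumentos (argumentos : List String) (out : List Bool) : Prop := out = procesar_argumentos_alt argumentos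
instance (argumentos : List String) (out : List Bool) : Decidable (Spec_procesar_argumentos argumentos out) := by unfold Spec_procesar_argumentos; infer_instance

-- ===== CLAIM (what is proved, stated in full; the proofs are below) =====
def Claim_equal_procesar_argumentos : Prop := ∀ (argumentos : List String), Dom_procesar_argumentos argumentos → Spec_procesar_argumentos argumentos (procesar_argumentos argumentos)

-- ===== LEMMAS AND PROOFS =====

-- one inner pass over the flag list adds exactly the flags occurring in s
theorem pv_mem_inner (fl : List String) (seen : PySem.Set String) (s f : String) :
    f ∈ fl.foldl (fun seen g => if PySem.Str.isIn g s then PySem.Set.add seen g else seen) seen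
      ↔ f ∈ seen ∨ (f ∈ fl ∧ PySem.Str.isIn f s = true) := by
  induction fl generalizing seen with
  | nil => simp
  | cons g gs ih =>
      simp only [List.foldl_cons]
      by_cases hg : PySem.Str.isIn g s = true
      · rw [if_pos hg, ih]
        simp only [PySem.Set.mem_add, List.mem_cons]
        constructor
        · rintro ((h | rfl) | ⟨h1, h2⟩)
          · exact Or.inl h
          · exact Or.inr ⟨Or.inl rfl, hg⟩
          · exact Or.inr ⟨Or.inr h1, h2⟩
        · rintro (h | ⟨(rfl | h), hf⟩)
          · exact Or.inl (Or.inl h)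
          · exact Or.inl (Or.inr rfl)
          · exact Or.inr ⟨h, hf⟩
      · rw [if_neg hg, ih]
        simp only [List.mem_cons]
        constructor
        · rintro (h | ⟨h1, h2⟩)
          · exact Or.inl h
          · exact Or.inr ⟨Or.inr h1, h2⟩
        · rintro (h | ⟨(rfl | h), hf⟩)
          · exact Or.inl h
          · exact absurd hf hg
          · exact Or.inr ⟨h, hf⟩

-- the whole single pass collects a flag iff some argument contains it
theorem pv_mem_seen (args : List String) (seen : PySem.Set String) (f : String) :
    f ∈ args.foldl
        (fun seen s => pvFlags.foldl
          (fun seen g => if PySem.Str.isIn g s then PySem.Set.add seen g else seen) seen)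
        seen
      ↔ f ∈ seen ∨ (f ∈ pvFlags ∧ ∃ s ∈ args, PySem.Str.isIn f s = true) := by
  induction args generalizing seen with
  | nil => simp
  | cons s ss ih =>
      simp only [List.foldl_cons, ih, pv_mem_inner]
      constructor
      · rintro ((h | ⟨hfl, hs⟩) | ⟨hfl, t, ht, hft⟩)
        · exact Or.inl h
        · exact Or.inr ⟨hfl, s, by simp, hs⟩
        · exact Or.inr ⟨hfl, t, by simp [ht], hft⟩
      · rintro (h | ⟨hfl, t, ht, hft⟩)
        · exact Or.inl (Or.inl h)
        · rcases List.mem_cons.mp ht with rfl | ht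
          · exact Or.inl (Or.inr ⟨hfl, hft⟩)
          · exact Or.inr ⟨hfl, t, ht, hft⟩

theorem pv_contains_seen (args : List String) (f : String) (hf : f ∈ pvFlags) :
    PySem.Set.contains
      (args.foldl
        (fun seen s => pvFlags.foldl
          (fun seen g => if PySem.Str.isIn g s then PySem.Set.add seen g else seen) seen)
        PySem.Set.empty) f
      = args.any (fun s => PySem.Str.isIn f s) := by
  rcases h : args.any (fun s => PySem.Str.isIn f s) with _ | _
  · rw [Bool.eq_false_iff]
    intro hc
    rcases (pv_mem_seen args PySem.Set.empty f).mp ((PySem.Set.contains_iff _ _).mp hc) with h' | ⟨_, t, ht, hft⟩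
    · simp [PySem.Set.empty] at h'
    · exact absurd (List.any_eq_true.mpr ⟨t, ht, hft⟩) (by simp [h])
  · rcases List.any_eq_true.mp h with ⟨t, ht, hft⟩
    exact (PySem.Set.contains_iff _ _).mpr ((pv_mem_seen args PySem.Set.empty f).mpr (Or.inr ⟨hf, t, ht, hft⟩))

-- an if appending [true]/[false] is appending the condition itself
theorem pv_if_append (b : Bool) (l : List Bool) :
    (if b = true then l ++ [true] else l ++ [false]) = l ++ [b] := by
  cases b <;> rfl

-- ===== VERDICT (by name: the statement is the Claim_ definition above) =====
theorem procesar_argumentos_spec : Claim_equal_procesar_argumentos := by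
  intro argumentos _
  unfold Spec_procesar_argumentos procesar_argumentos procesar_argumentos_alt
  by_cases h : argumentos.length == 1
  · simp [h]
  · simp only [h, if_false, Bool.false_eq_true]
    have hi := pv_contains_seen argumentos "-i" (by decide)
    have ht := pv_contains_seen argumentos "-t" (by decide)
    have hm := pv_contains_seen argumentos "-m" (by decide)
    have hu := pv_contains_seen argumentos "-u" (by decide)
    simp only [pvFlags] at hi ht hm hu ⊢
    simp only [List.map_cons, List.map_nil, pv_if_append]
    rw [hi, ht, hm, hu]
    simp
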